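/-
  jsmn_d.bin: `jsmn_alloc_token` (54 bytes at 100040H, 15 instructions) and `jsmn_fill_token` (16 bytes at 100076H, 5 instructions).
-/
import Prog.Jsmn.State
import Prog.Jsmn.CodeD
import X86.Derived.Prog.MemWords

namespace X86
namespace J6
namespace D
open X86.User (CodeAt RegsKept Span FlagsOK Layout toNat_add_ofNat toNat_ofNat_lt' add_ofNat_add)
open Jsmn JsmnDBytes

set_option maxRecDepth 100000
set_option maxHeartbeats 4000000
set_option linter.unusedSimpArgs false
set_option linter.unusedVariables false

variable {n : User.Layout} {v0 : User.State} {ret pa tb : Word} {numTokens : Nat} {p : Parser} {ts : Tokens}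

theorem alloc_reach (hp : AllocPre binD n v0 ret pa tb numTokens p ts) : Reach n v0 (AllocPost binD v0 ret pa tb numTokens p ts) := by
  v3_open hp
  j6_bin
  have hcode := JsmnD.tjd_jsmn_alloc_token_code hp_call_img
  have htn : p.toknext < 2 ^ 32 := hp_parser_toknext ▸ User.Mem.readLE4_lt _ _
  have hsh := shl4_index p.toknext htn
  v3_walk hcode hp.call.fetch [hp_call_retAddr, hp_call_retlt, hsh]
  · -- no room: return NULL
    have hge : p.toknext ≥ numTokens := by v3_omega
    refine Reach.done ?_
    unfold AllocPost
    rw [show allocToken binD.cfg p ts numTokens = none by simp [allocToken, hge]]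
    exact ⟨⟨by simp, by simp, RegsKept.saved (S := [.rax, .rcx, .rdx, .rsp]) (by v3_kept) rfl, by v3_same⟩, by simp, by simp⟩
  · -- tokens[toknext] initialised, toknext + 1
    have hlt : p.toknext < numTokens := by v3_omega
    have hlt' : ¬ p.toknext ≥ numTokens := by omega
    have hmul := tokSize_mul_le Config.default (hp_tlen ▸ hlt : p.toknext < ts.length)
    rw [tokSize_default] at hmul
    refine Reach.done ?_
    unfold AllocPost
    simp only [allocToken, hlt', if_false, binD_cfg, tokSize_default, links_default, Bool.false_eq_true]
    have haddr : UInt64.ofNat (16 * p.toknext) + tb = tokAddr Config.default tb p.toknext := by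
      unfold tokAddr; rw [tokSize_default]; exact UInt64.add_comm _ _
    refine ⟨⟨by simp [hretW], by simp, RegsKept.saved (S := [.rax, .rcx, .rdx, .rsp]) (by v3_kept) rfl, by unfold dataWins; v3_same⟩, ?_, ?_, ?_⟩
    · v3_regnorm; exact haddr
    · refine ⟨by v3_read, ?_, by v3_frame hp_parser_toksuper⟩
      v3_memnorm
      show _ = u32 ((p.toknext : Int) + 1)
      have : u32 ((p.toknext : Int) + 1) = (p.toknext + 1) % 4294967296 := by unfold u32; omega
      rw [this]
      v3_read
    · v3_memnorm
      refine TokensAt.update hp_toks (hp_tlen ▸ hlt) (by rw [tokSize_default, hp_tlen]; v3_omega) (by rw [tokSize_default]; v3_eqon) (by rw [tokSize_default, hp_tlen]; v3_eqon) ?_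
      have ht0 := hp_toks.getD p.toknext (hp_tlen ▸ hlt)
      rw [← haddr] at ht0 ⊢
      have ht0t := ht0.type
      refine ⟨by v3_frame ht0t, holds32_read (by v3_read) holds32_neg1, holds32_read (by v3_read) holds32_neg1, holds32_read (by v3_read) holds32_zero,
        fun h => absurd h (by decide)⟩

theorem alloc_spec (n : User.Layout) : AllocSpec binD n := fun _ _ _ _ _ _ _ h => alloc_reach h

theorem fill_reach {i type : Nat} {start «end» : Int} (hp : FillPre binD n v0 ret tb ts i type start «end») :
    Reach n v0 (FillPost binD v0 ret tb ts i type start «end») := by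
  v3_open hp
  j6_bin
  have hcode := JsmnD.tjd_jsmn_fill_token_code hp_call_img
  have hmul := tokSize_mul_le Config.default hp_ilt
  rw [tokSize_default] at hmul
  have haddr : tokAddr Config.default tb i = tb + UInt64.ofNat (16 * i) := by unfold tokAddr; rw [tokSize_default]
  rw [haddr] at hp_rdi
  v3_walk hcode hp.call.fetch [hp_call_retAddr, hp_call_retlt]
  refine Reach.done ?_
  unfold FillPost
  simp only [binD_cfg, tokSize_default]
  refine ⟨⟨by simp [hretW], by simp, RegsKept.saved (S := [.rsp]) (by v3_kept) rfl, by v3_same⟩, ?_⟩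
  v3_memnorm
  rw [hp_rsi, hp_rdx, hp_rcx]
  have hu1 := u32_lt start
  have hu2 := u32_lt «end»
  refine TokensAt.update hp_toks hp_ilt (by rw [tokSize_default]; v3_omega) (by rw [tokSize_default]; v3_eqon) (by rw [tokSize_default]; v3_eqon) ?_
  rw [haddr]
  have ht0 := hp_toks.getD i hp_ilt
  have htl : (UInt64.ofNat type).toNat = type := by v3_omega
  rw [htl]
  refine ⟨by dsimp only [fillToken]; v3_read, holds32_read (raw := u32 start) (by v3_read) (holds32_of_range _ hp.startR.1 hp.startR.2),
    holds32_read (raw := u32 «end») (by v3_read) (holds32_of_range _ hp.endR.1 hp.endR.2), holds32_read (by v3_read) holds32_zero,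
    fun h => absurd h (by decide)⟩

theorem fill_spec (n : User.Layout) : FillSpec binD n := fun _ _ _ _ _ _ _ _ h => fill_reach h

end D
end J6
end X86
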